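-- pv_equiv track=rewrite | github.com/NormJY/Algorithms | 1_exercise_level2/JadenCase_solution.py | JadenCase_solution
-- ===== SOURCE A (Python) =====
-- def JadenCase_solution(s):
--     s = s.lower()
--     L = s.split(" ")
--     answer = ''
--     for i in L:
--         i = i.capitalize()
--         answer += i + " "
--
--     return answer[:-1]
-- ===== SOURCE B (Python) =====
-- def JadenCase_solution(s):
--     t = s.lower()
--     return ''.join(c.upper() if p == ' ' else c for p, c in zip(' ' + t, t))
-- ===== Notes on version B (the rewrite author's own statement) =====
-- stated objective: alternative
-- what changed: Replaces A's split-on-space / capitalize-each-word / concatenate-and-strip pipeline by a single one-pass character scan that uppercases exactly the characters that follow a space (zip of the lowered string with itself shifted by one, using a sentinel leading space).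
import Mathlib
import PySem

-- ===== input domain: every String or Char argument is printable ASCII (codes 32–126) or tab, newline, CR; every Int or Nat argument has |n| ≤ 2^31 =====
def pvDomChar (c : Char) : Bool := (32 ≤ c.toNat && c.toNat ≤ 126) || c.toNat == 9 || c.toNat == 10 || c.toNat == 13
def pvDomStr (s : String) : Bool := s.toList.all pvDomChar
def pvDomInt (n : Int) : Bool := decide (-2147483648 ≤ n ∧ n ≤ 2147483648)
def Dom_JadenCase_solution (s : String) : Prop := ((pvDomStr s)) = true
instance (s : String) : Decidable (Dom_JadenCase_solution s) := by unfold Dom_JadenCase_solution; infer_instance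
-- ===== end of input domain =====

-- B replaces A's split-on-space / capitalize-each-word / concatenate-and-strip pipeline
-- by a single one-pass character scan (zip with the string shifted by one sentinel space);
-- same O(n) cost, different decomposition.


-- ===== PORT A =====
-- i.capitalize(): first char titlecased, rest lowered — exact on the ASCII domain,
-- where titlecase = uppercase.
def capAscii (w : List Char) : List Char :=
  match w with
  | [] => []
  | c :: r => PySem.Chars.upperChar c :: PySem.Chars.lower r

def JadenCase_solution (s : String) : String :=
  let t := PySem.Chars.lower s.toList
  let L := PySem.Chars.splitOn t [' ']
  let answer := L.foldl (fun acc w => acc ++ (capAscii w ++ [' '])) []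
  String.ofList (PySem.List.slice answer none (some (-1)))

-- ===== PORT B =====
-- Source B: t = s.lower(); ''.join(c.upper() if p == ' ' else c for p, c in zip(' ' + t, t))
def JadenCase_solution_alt (s : String) : String :=
  let t := PySem.Chars.lower s.toList
  String.ofList ((List.zip (' ' :: t) t).map
    (fun pc => if pc.1 == ' ' then PySem.Chars.upperChar pc.2 else pc.2))

-- ===== PRECONDITION & SPEC =====
def Spec_JadenCase_solution (s : String) (out : String) : Prop := out = JadenCase_solution_alt s
instance (s : String) (out : String) : Decidable (Spec_JadenCase_solution s out) := by unfold Spec_JadenCase_solution; infer_instance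

-- ===== CLAIM (what is proved, stated in full; the proofs are below) =====
def Claim_equal_JadenCase_solution : Prop := ∀ (s : String), Dom_JadenCase_solution s → Spec_JadenCase_solution s (JadenCase_solution s)

-- ===== LEMMAS AND PROOFS =====

-- structural version of s.split(" "): split at every space
def ssplit : List Char → List (List Char)
  | [] => [[]]
  | c :: r => if c = ' ' then [] :: ssplit r else (c :: (ssplit r).headI) :: (ssplit r).tail

-- B's scan as a recursion: `up` = "previous char was a space (or start)"
def bscan : Bool → List Char → List Char
  | _, [] => []
  | up, c :: r => (if up then PySem.Chars.upperChar c else c) :: bscan (c == ' ') r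

theorem capAscii_nil : capAscii [] = [] := rfl

theorem capAscii_cons (c : Char) (r : List Char) :
    capAscii (c :: r) = PySem.Chars.upperChar c :: PySem.Chars.lower r := rfl

theorem ssplit_ne_nil (t : List Char) : ssplit t ≠ [] := by
  cases t
  · simp [ssplit]
  · simp [ssplit]; split <;> simp

theorem toNat_ofNat_valid (n : Nat) (hn : n < 55296) : (Char.ofNat n).toNat = n := by
  have hv : n.isValidChar := Or.inl hn
  show (Char.ofNat n).val.toNat = n
  rw [Char.val_ofNat hv, UInt32.toNat_ofNat']
  omega

theorem lowerChar_idem (c : Char) :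
    PySem.Chars.lowerChar (PySem.Chars.lowerChar c) = PySem.Chars.lowerChar c := by
  unfold PySem.Chars.lowerChar PySem.Chars.isupper
  by_cases h1 : 'A' ≤ c
  · by_cases h2 : c ≤ 'Z'
    · have hA : 65 ≤ c.toNat := h1
      have hZ : c.toNat ≤ 90 := h2
      have ht : (Char.ofNat (c.toNat + 32)).toNat = c.toNat + 32 := toNat_ofNat_valid _ (by omega)
      have hnle : ¬ ('A' ≤ Char.ofNat (c.toNat + 32) ∧ Char.ofNat (c.toNat + 32) ≤ 'Z') := by
        intro ⟨_, hle⟩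
        have : (Char.ofNat (c.toNat + 32)).toNat ≤ 90 := hle
        omega
      simp [h1, h2]
      intro ha hb
      exact absurd ⟨ha, hb⟩ hnle
    · simp [h2]
  · simp [h1]

theorem mem_lower_fixed {t : List Char} {c : Char} (h : c ∈ PySem.Chars.lower t) :
    PySem.Chars.lowerChar c = c := by
  unfold PySem.Chars.lower at h
  obtain ⟨d, _, rfl⟩ := List.mem_map.mp h
  exact lowerChar_idem d

theorem mem_of_mem_ssplit {t w : List Char} (hw : w ∈ ssplit t) {c : Char} (hc : c ∈ w) :
    c ∈ t := by
  induction t generalizing w with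
  | nil => simp [ssplit] at hw; subst hw; simp at hc
  | cons x r ih =>
    by_cases hx : x = ' '
    · simp [ssplit, hx] at hw
      rcases hw with rfl | hw
      · simp at hc
      · exact List.mem_cons_of_mem _ (ih hw hc)
    · simp [ssplit, hx] at hw
      rcases hw with rfl | hw
      · rcases List.mem_cons.mp hc with rfl | hc'
        · exact List.mem_cons_self
        · obtain ⟨h0, tl, heq⟩ := List.exists_cons_of_ne_nil (ssplit_ne_nil r)
          rw [heq] at hc'
          simp only [List.headI_cons] at hc'
          exact List.mem_cons_of_mem _ (ih (by rw [heq]; exact List.mem_cons_self) hc')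
      · exact List.mem_cons_of_mem _ (ih (List.mem_of_mem_tail hw) hc)

-- splitOn's fuelled worker computes ssplit
theorem go_eq_ssplit (l : List Char) :
    ∀ (fuel : Nat) (cur : List Char) (acc : List (List Char)), l.length < fuel →
    PySem.Chars.splitOn.go [' '] fuel l cur acc =
      acc.reverse ++ (cur.reverse ++ (ssplit l).headI) :: (ssplit l).tail := by
  induction l with
  | nil =>
    intro fuel cur acc h
    cases fuel with
    | zero => omega
    | succ f => simp [PySem.Chars.splitOn.go, ssplit]
  | cons c rest ih =>
    intro fuel cur acc h
    cases fuel with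
    | zero => omega
    | succ f =>
      rw [PySem.Chars.splitOn.go]
      by_cases hc : c = ' '
      · subst hc
        have hpre : [' '].isPrefixOf (' ' :: rest) = true := by simp [List.isPrefixOf]
        simp only [hpre, if_true, List.length_cons] at *
        rw [show List.drop (List.length ([] : List Char) + 1) (' ' :: rest) = rest from rfl]
        rw [ih f [] (cur.reverse :: acc) (by omega)]
        obtain ⟨h0, tl, heq⟩ := List.exists_cons_of_ne_nil (ssplit_ne_nil rest)
        simp [ssplit, heq]
      · have hpre : [' '].isPrefixOf (c :: rest) = false := by
          simp [List.isPrefixOf]; exact fun e => hc e.symm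
        simp only [hpre, Bool.false_eq_true, if_false]
        rw [ih f (c :: cur) acc (by simpa using h)]
        simp [ssplit, hc]

theorem splitOn_eq_ssplit (t : List Char) :
    PySem.Chars.splitOn t [' '] = ssplit t := by
  unfold PySem.Chars.splitOn
  rw [go_eq_ssplit t (t.length + 1) [] [] (Nat.lt_succ_self _)]
  obtain ⟨h0, tl, heq⟩ := List.exists_cons_of_ne_nil (ssplit_ne_nil t)
  rw [heq]
  simp

-- the core: on an already-lowered list, capitalize-and-join over ssplit is B's scan
theorem pq : ∀ (t : List Char), (∀ c ∈ t, PySem.Chars.lowerChar c = c) →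
    ((ssplit t).flatMap (fun w => capAscii w ++ [' ']) = bscan true t ++ [' ']) ∧
    ((ssplit t).headI ++ [' '] ++ ((ssplit t).tail).flatMap (fun w => capAscii w ++ [' '])
      = bscan false t ++ [' ']) := by
  intro t
  induction t with
  | nil => intro _; simp [ssplit, capAscii, bscan]
  | cons c r ih =>
    intro hm
    have hmr : ∀ x ∈ r, PySem.Chars.lowerChar x = x :=
      fun x hx => hm x (List.mem_cons_of_mem _ hx)
    obtain ⟨Pr, Qr⟩ := ih hmr
    by_cases hc : c = ' '
    · subst hc
      constructor
      · simp only [ssplit, List.flatMap_cons, capAscii_nil, List.nil_append,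
          bscan, if_true, show PySem.Chars.upperChar ' ' = ' ' from by decide,
          show (' ' == ' ') = true from by decide, Pr]
        simp
      · simp only [ssplit, bscan,
          show (' ' == ' ') = true from by decide, Bool.false_eq_true, if_false]
        simp [Pr]
    · obtain ⟨h0, tl, heq⟩ := List.exists_cons_of_ne_nil (ssplit_ne_nil r)
      have hlow : PySem.Chars.lower h0 = h0 := by
        unfold PySem.Chars.lower
        conv_rhs => rw [← List.map_id h0]
        exact List.map_congr_left
          (fun x hx => hmr x (mem_of_mem_ssplit (heq ▸ List.mem_cons_self) hx))
      rw [heq] at Qr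
      simp only [List.headI_cons, List.tail_cons] at Qr
      have hbeq : (c == ' ') = false := by simp [hc]
      constructor
      · simp only [ssplit, if_neg hc, heq, List.headI_cons, List.tail_cons,
          List.flatMap_cons, capAscii_cons, hlow, bscan, hbeq, if_true, List.cons_append,
          List.append_assoc]
        congr 1
        simpa using Qr
      · simp only [ssplit, if_neg hc, heq, List.headI_cons, List.tail_cons,
          bscan, hbeq, Bool.false_eq_true, if_false, List.cons_append, List.append_assoc]
        congr 1
        simpa using Qr

theorem zip_map_eq_bscan (t : List Char) : ∀ (p : Char),
    (List.zip (p :: t) t).map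
      (fun pc => if pc.1 == ' ' then PySem.Chars.upperChar pc.2 else pc.2) =
    bscan (p == ' ') t := by
  induction t with
  | nil => intro p; rfl
  | cons c r ih =>
    intro p
    simp only [List.zip_cons_cons, List.map_cons, ih c, bscan]

-- ===== VERDICT (by name: the statement is the Claim_ definition above) =====
theorem JadenCase_solution_spec : Claim_equal_JadenCase_solution := by
  intro s _
  unfold Spec_JadenCase_solution JadenCase_solution JadenCase_solution_alt
  dsimp only
  set t := PySem.Chars.lower s.toList with ht
  have hm : ∀ c ∈ t, PySem.Chars.lowerChar c = c := fun c hc => mem_lower_fixed hc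
  rw [splitOn_eq_ssplit, PySem.List.foldl_append_eq_flatMap, (pq t hm).1]
  rw [PySem.List.slice_to_neg_one, List.nil_append, List.dropLast_concat]
  rw [zip_map_eq_bscan t ' ']
  rfl
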